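-- pv_equiv track=rewrite | github.com/zacharycraig1/Canonical-Positive-Geometry-Twistor-Gravity-Exploration | src/chy_oracle/channels.py | get_unique_3pt_channels
-- ===== SOURCE A (Python) =====
-- from itertools import combinations
--
-- def get_unique_3pt_channels(n=6):
--     """Returns list of unique 3-particle channels (pairs of complement sets)."""
--     indices = set(range(n))
--     seen_channels = set()
--     channels_to_test = []
--
--     for comb in combinations(indices, 3):
--         c = tuple(sorted(comb))
--         complement = tuple(sorted(list(indices - set(c))))
--
--         if c in seen_channels or complement in seen_channels:
--             continue
--
--         seen_channels.add(c)
--         seen_channels.add(complement)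
--         channels_to_test.append(c)
--
--     return channels_to_test
-- ===== SOURCE B (Python) =====
-- from itertools import combinations
--
--
-- def get_unique_3pt_channels(n=6):
--     """Returns list of unique 3-particle channels (pairs of complement sets).
--
--     A 3-subset and its complement name the same channel only when the
--     complement is itself a 3-subset, i.e. when n == 6; the kept
--     representative of each complementary pair is then the triple that
--     contains particle 0 (its complement cannot).  For n != 6 every triple
--     is its own channel.
--     """
--     return [c for c in combinations(range(n), 3) if n != 6 or 0 in c]
-- ===== Notes on version B (the rewrite author's own statement) =====
-- stated objective: simpler
-- what changed: Replaced the stateful seen-set/complement deduplication with a stateless comprehension that keeps a triple by a closed-form representative rule (for n=6 keep the triple of each complementary pair that contains 0; for any other n the complement is not a 3-subset, so every triple is kept).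
import Mathlib
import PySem

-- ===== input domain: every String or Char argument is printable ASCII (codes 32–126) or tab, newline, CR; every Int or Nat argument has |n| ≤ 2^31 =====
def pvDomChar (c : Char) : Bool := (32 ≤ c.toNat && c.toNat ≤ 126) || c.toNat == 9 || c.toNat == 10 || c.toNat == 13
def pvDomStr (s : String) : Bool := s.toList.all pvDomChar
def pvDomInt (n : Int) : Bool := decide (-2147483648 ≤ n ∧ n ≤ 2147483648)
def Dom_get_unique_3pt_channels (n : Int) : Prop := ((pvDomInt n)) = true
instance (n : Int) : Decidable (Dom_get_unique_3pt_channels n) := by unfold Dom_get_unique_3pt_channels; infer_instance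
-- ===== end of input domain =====

-- B replaces A's stateful seen-set/complement dedup by a stateless comprehension with a
-- closed-form representative rule (objective: simpler).

-- ===== PORT A =====
-- itertools.combinations(xs, 2) over a list, in emission order
def pvComb2 : List Int → List (List Int)
  | [] => []
  | x :: xs => xs.map (fun y => [x, y]) ++ pvComb2 xs

-- itertools.combinations(xs, 3) over a list, in emission order
def pvComb3 : List Int → List (List Int)
  | [] => []
  | x :: xs => (pvComb2 xs).map (fun p => x :: p) ++ pvComb3 xs

-- CPython iterates a set of the contiguous ints 0..n-1 in increasing order (hash(i) = i),
-- so set(range(n)) enumerates as range(n); ported exactly on that domain.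
def get_unique_3pt_channels (n : Int) : List (List Int) :=
  let indices : PySem.Set Int := PySem.Set.ofList (PySem.List.pyRange 0 n 1)
  let step := fun (st : PySem.Set (List Int) × List (List Int)) (comb : List Int) =>
    let c := PySem.List.sorted comb (fun x => x) false
    let complement := PySem.List.sorted
      (PySem.Set.diff indices (PySem.Set.ofList c)) (fun x => x) false
    if PySem.Set.contains st.1 c || PySem.Set.contains st.1 complement then st
    else ((PySem.Set.add (PySem.Set.add st.1 c) complement), st.2 ++ [c])
  ((pvComb3 indices).foldl step (PySem.Set.empty, [])).2

-- ===== PORT B =====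
def get_unique_3pt_channels_alt (n : Int) : List (List Int) :=
  (pvComb3 (PySem.List.pyRange 0 n 1)).filter
    (fun c => decide (n ≠ 6) || decide ((0 : Int) ∈ c))

-- ===== PRECONDITION & SPEC =====
def Spec_get_unique_3pt_channels (n : Int) (out : List (List Int)) : Prop := out = get_unique_3pt_channels_alt n
instance (n : Int) (out : List (List Int)) : Decidable (Spec_get_unique_3pt_channels n out) := by unfold Spec_get_unique_3pt_channels; infer_instance

-- ===== CLAIM (what is proved, stated in full; the proofs are below) =====
def Claim_equal_get_unique_3pt_channels : Prop := ∀ (n : Int), Dom_get_unique_3pt_channels n → Spec_get_unique_3pt_channels n (get_unique_3pt_channels n)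

-- ===== LEMMAS AND PROOFS =====

theorem mem_pvComb2_sublist {c l : List Int} (h : c ∈ pvComb2 l) : c.Sublist l := by
  induction l with
  | nil => simp [pvComb2] at h
  | cons x xs ih =>
    simp only [pvComb2, List.mem_append, List.mem_map] at h
    rcases h with ⟨y, hy, rfl⟩ | h
    · exact (List.cons_sublist_cons.mpr (List.singleton_sublist.mpr hy))
    · exact (ih h).cons x

theorem mem_pvComb3_sublist {c l : List Int} (h : c ∈ pvComb3 l) : c.Sublist l := by
  induction l with
  | nil => simp [pvComb3] at h
  | cons x xs ih =>
    simp only [pvComb3, List.mem_append, List.mem_map] at h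
    rcases h with ⟨p, hp, rfl⟩ | h
    · exact List.cons_sublist_cons.mpr (mem_pvComb2_sublist hp)
    · exact (ih h).cons x

theorem mem_pvComb2_length {c l : List Int} (h : c ∈ pvComb2 l) : c.length = 2 := by
  induction l with
  | nil => simp [pvComb2] at h
  | cons x xs ih =>
    simp only [pvComb2, List.mem_append, List.mem_map] at h
    rcases h with ⟨y, _, rfl⟩ | h
    · rfl
    · exact ih h

theorem mem_pvComb3_length {c l : List Int} (h : c ∈ pvComb3 l) : c.length = 3 := by
  induction l with
  | nil => simp [pvComb3] at h
  | cons x xs ih =>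
    simp only [pvComb3, List.mem_append, List.mem_map] at h
    rcases h with ⟨p, hp, rfl⟩ | h
    · simp [mem_pvComb2_length hp]
    · exact ih h

theorem pvComb2_nodup {l : List Int} (hl : l.Nodup) : (pvComb2 l).Nodup := by
  induction l with
  | nil => simp [pvComb2]
  | cons x xs ih =>
    simp only [pvComb2]
    rcases List.nodup_cons.mp hl with ⟨hx, hxs⟩
    refine List.Nodup.append ?_ (ih hxs) ?_
    · exact (List.nodup_map_iff (fun a b hab => by simpa using hab)).mpr hxs
      |>.imp (fun h => h) |> fun h => h
    · intro c hc1 hc2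
      obtain ⟨y, _, rfl⟩ := List.mem_map.mp hc1
      exact hx ((mem_pvComb2_sublist hc2).subset (by simp))

theorem pvComb3_nodup {l : List Int} (hl : l.Nodup) : (pvComb3 l).Nodup := by
  induction l with
  | nil => simp [pvComb3]
  | cons x xs ih =>
    simp only [pvComb3]
    rcases List.nodup_cons.mp hl with ⟨hx, hxs⟩
    refine List.Nodup.append ?_ (ih hxs) ?_
    · exact (pvComb2_nodup hxs).map (fun a b hab => by simpa using hab)
    · intro c hc1 hc2
      obtain ⟨p, _, rfl⟩ := List.mem_map.mp hc1
      exact hx ((mem_pvComb3_sublist hc2).subset (by simp))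


-- abbreviations for the proofs
def pvR (n : Int) : List Int := PySem.List.pyRange 0 n 1

def pvCompl (n : Int) (c : List Int) : List Int :=
  PySem.List.sorted (PySem.Set.diff (PySem.Set.ofList (PySem.List.pyRange 0 n 1))
    (PySem.Set.ofList c)) (fun x => x) false

theorem filter_mem_of_sublist {c R : List Int} (h : c.Sublist R) (hR : R.Nodup) :
    R.filter (fun x => decide (x ∈ c)) = c := by
  induction h with
  | slnil => rfl
  | @cons l1 l2 a h ih =>
    rcases List.nodup_cons.mp hR with ⟨ha, hR'⟩
    have hac : a ∉ l1 := fun hm => ha (h.subset hm)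
    rw [List.filter_cons_of_neg (by simpa using hac), ih hR']
  | @cons₂ l1 l2 a h ih =>
    rcases List.nodup_cons.mp hR with ⟨ha, hR'⟩
    have hcong : List.filter (fun x => decide (x ∈ a :: l1)) l2
        = List.filter (fun x => decide (x ∈ l1)) l2 :=
      List.filter_congr (fun x hx => by
        have hxa : x ≠ a := fun he => ha (he ▸ hx)
        simp [hxa])
    rw [List.filter_cons_of_pos (by simp), hcong, ih hR']

theorem contains_ofList_eq (c : List Int) (x : Int) :
    (PySem.Set.ofList c).contains x = decide (x ∈ c) := by
  by_cases hx : x ∈ c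
  · rw [(PySem.Set.contains_iff _ _).mpr ((PySem.Set.mem_ofList c x).mpr hx)]
    simp [hx]
  · have hnot : ¬ x ∈ PySem.Set.ofList c := fun hm => hx ((PySem.Set.mem_ofList c x).mp hm)
    rw [Bool.eq_false_iff.mpr (fun hc => hnot ((PySem.Set.contains_iff _ _).mp hc))]
    simp [hx]

theorem pvCompl_eq_filter (n : Int) (c : List Int) :
    PySem.Set.diff (PySem.Set.ofList (PySem.List.pyRange 0 n 1)) (PySem.Set.ofList c)
      = (pvR n).filter (fun x => !decide (x ∈ c)) := by
  rw [PySem.Set.ofList_eq_self_of_nodup _ (PySem.List.nodup_pyRange_one 0 n)]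
  show (pvR n).filter (fun x => !(PySem.Set.ofList c).contains x) = _
  exact List.filter_congr (fun x _ => by rw [contains_ofList_eq])

theorem pvCompl_length {n : Int} {c : List Int} (h : c.Sublist (pvR n)) :
    (pvCompl n c).length = (pvR n).length - c.length := by
  have hnd : (pvR n).Nodup := PySem.List.nodup_pyRange_one 0 n
  have hsplit : (pvR n).length = ((pvR n).filter (fun x => decide (x ∈ c))).length
      + ((pvR n).filter (fun x => !decide (x ∈ c))).length :=
    List.length_eq_length_filter_add _
  rw [filter_mem_of_sublist h hnd] at hsplit
  unfold pvCompl
  rw [PySem.List.length_sorted, pvCompl_eq_filter]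
  omega

theorem mem_pvCompl {n : Int} {c : List Int} (x : Int) :
    x ∈ pvCompl n c ↔ x ∈ pvR n ∧ x ∉ c := by
  unfold pvCompl
  rw [List.Perm.mem_iff (PySem.List.sorted_perm _ _ _), pvCompl_eq_filter]
  simp

theorem pvCompl_inj {n : Int} {a b : List Int} (ha : a.Sublist (pvR n))
    (hb : b.Sublist (pvR n)) (h : pvCompl n a = pvCompl n b) : a = b := by
  have hnd : (pvR n).Nodup := PySem.List.nodup_pyRange_one 0 n
  have key : ∀ x ∈ pvR n, (decide (x ∈ a) = decide (x ∈ b)) := by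
    intro x hx
    have hiff : x ∈ a ↔ x ∈ b := by
      constructor
      · intro hxa
        by_contra hxb
        have hm : x ∈ pvCompl n b := (mem_pvCompl x).mpr ⟨hx, hxb⟩
        rw [← h] at hm
        exact ((mem_pvCompl x).mp hm).2 hxa
      · intro hxb
        by_contra hxa
        have hm : x ∈ pvCompl n a := (mem_pvCompl x).mpr ⟨hx, hxa⟩
        rw [h] at hm
        exact ((mem_pvCompl x).mp hm).2 hxb
    exact decide_eq_decide.mpr hiff
  calc a = (pvR n).filter (fun x => decide (x ∈ a)) := (filter_mem_of_sublist ha hnd).symm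
    _ = (pvR n).filter (fun x => decide (x ∈ b)) := List.filter_congr key
    _ = b := filter_mem_of_sublist hb hnd

theorem sorted_of_mem_pvComb3 {n : Int} {c : List Int}
    (h : c ∈ pvComb3 (pvR n)) : PySem.List.sorted c (fun x => x) false = c := by
  have hp : c.Pairwise (· < ·) :=
    (PySem.List.pairwise_lt_pyRange_one 0 n).sublist (mem_pvComb3_sublist h)
  exact PySem.List.sorted_eq_self_of_pairwise c _ (hp.imp le_of_lt)

theorem fold_keep (n : Int) (L : List (List Int)) (seen : PySem.Set (List Int))
    (acc : List (List Int))
    (hL : ∀ c ∈ L, PySem.List.sorted c (fun x => x) false = c)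
    (hseen : ∀ c ∈ L, c ∉ seen ∧ pvCompl n c ∉ seen)
    (hpair : L.Pairwise (fun a b =>
      a ≠ b ∧ a ≠ pvCompl n b ∧ pvCompl n a ≠ b ∧ pvCompl n a ≠ pvCompl n b)) :
    (L.foldl (fun (st : PySem.Set (List Int) × List (List Int)) (comb : List Int) =>
      if PySem.Set.contains st.1 (PySem.List.sorted comb (fun x => x) false)
          || PySem.Set.contains st.1 (PySem.List.sorted
            (PySem.Set.diff (PySem.Set.ofList (PySem.List.pyRange 0 n 1))
              (PySem.Set.ofList (PySem.List.sorted comb (fun x => x) false))) (fun x => x) false)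
      then st
      else (PySem.Set.add (PySem.Set.add st.1 (PySem.List.sorted comb (fun x => x) false))
              (PySem.List.sorted (PySem.Set.diff (PySem.Set.ofList (PySem.List.pyRange 0 n 1))
                (PySem.Set.ofList (PySem.List.sorted comb (fun x => x) false))) (fun x => x) false),
            st.2 ++ [PySem.List.sorted comb (fun x => x) false]))
      (seen, acc)).2 = acc ++ L := by
  induction L generalizing seen acc with
  | nil => simp
  | cons comb L' ih =>
    have hc : PySem.List.sorted comb (fun x => x) false = comb := hL comb (by simp)
    obtain ⟨h1, h2⟩ := hseen comb (by simp)
    rcases List.pairwise_cons.mp hpair with ⟨hhead, htail⟩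
    have e1 : PySem.Set.contains seen comb = false :=
      Bool.eq_false_iff.mpr (fun hx => h1 ((PySem.Set.contains_iff _ _).mp hx))
    have e2' : PySem.Set.contains seen (PySem.List.sorted
        (PySem.Set.diff (PySem.Set.ofList (PySem.List.pyRange 0 n 1))
          (PySem.Set.ofList comb)) (fun x => x) false) = false :=
      Bool.eq_false_iff.mpr (fun hx => h2 ((PySem.Set.contains_iff _ _).mp hx))
    rw [List.foldl_cons]
    rw [hc, e1, e2']
    simp only [Bool.or_self, Bool.false_eq_true, if_false]
    have hrest := ih (PySem.Set.add (PySem.Set.add seen comb) (pvCompl n comb)) (acc ++ [comb])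
      (fun c hcm => hL c (List.mem_cons_of_mem _ hcm))
      (fun c hcm => by
        obtain ⟨hx1, hx2⟩ := hseen c (List.mem_cons_of_mem _ hcm)
        obtain ⟨d1, d2, d3, d4⟩ := hhead c hcm
        constructor
        · intro hmem
          rcases (PySem.Set.mem_add _ _ _).mp hmem with hmem' | he
          · rcases (PySem.Set.mem_add _ _ _).mp hmem' with hmem'' | he
            · exact hx1 hmem''
            · exact d1 he.symm
          · exact d3 he.symm
        · intro hmem
          rcases (PySem.Set.mem_add _ _ _).mp hmem with hmem' | he
          · rcases (PySem.Set.mem_add _ _ _).mp hmem' with hmem'' | he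
            · exact hx2 hmem''
            · exact d2 he.symm
          · exact d4 he.symm)
      htail
    unfold pvCompl at hrest
    rw [hrest]
    simp

theorem main_ne (n : Int) (hn : n ≠ 6) :
    get_unique_3pt_channels n = get_unique_3pt_channels_alt n := by
  have hnodup : (pvComb3 (PySem.List.pyRange 0 n 1)).Nodup :=
    pvComb3_nodup (PySem.List.nodup_pyRange_one 0 n)
  have hlenR : (pvR n).length = n.toNat := by
    unfold pvR; rw [PySem.List.length_pyRange_one]; omega
  have hlen3 : ∀ c ∈ pvComb3 (pvR n), (pvCompl n c).length ≠ 3 := by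
    intro c hcm
    have hsub := mem_pvComb3_sublist hcm
    have h3 := mem_pvComb3_length hcm
    have hle : c.length ≤ (pvR n).length := hsub.length_le
    rw [pvCompl_length hsub, h3]
    rw [hlenR] at *
    omega
  have hpair : (pvComb3 (pvR n)).Pairwise (fun a b =>
      a ≠ b ∧ a ≠ pvCompl n b ∧ pvCompl n a ≠ b ∧ pvCompl n a ≠ pvCompl n b) := by
    refine (List.Pairwise.imp_of_mem ?_ hnodup)
    intro a b ham hbm hne
    refine ⟨hne, ?_, ?_, ?_⟩
    · intro he
      exact hlen3 b hbm (he ▸ mem_pvComb3_length ham)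
    · intro he
      exact hlen3 a ham (he.symm ▸ mem_pvComb3_length hbm)
    · intro he
      exact hne (pvCompl_inj (mem_pvComb3_sublist ham) (mem_pvComb3_sublist hbm) he)
  unfold get_unique_3pt_channels get_unique_3pt_channels_alt
  dsimp only
  rw [show pvComb3 (PySem.Set.ofList (PySem.List.pyRange 0 n 1))
      = pvComb3 (PySem.List.pyRange 0 n 1) from by
    rw [PySem.Set.ofList_eq_self_of_nodup _ (PySem.List.nodup_pyRange_one 0 n)]]
  rw [fold_keep n (pvComb3 (PySem.List.pyRange 0 n 1)) PySem.Set.empty []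
    (fun c hcm => sorted_of_mem_pvComb3 hcm)
    (fun c _ => ⟨by simp [PySem.Set.empty], by simp [PySem.Set.empty]⟩) hpair]
  have hall : ∀ c ∈ pvComb3 (PySem.List.pyRange 0 n 1),
      (decide (n ≠ 6) || decide ((0:Int) ∈ c)) = true := by
    intro c _; simp [hn]
  rw [List.filter_eq_self.mpr hall]
  simp

-- ===== VERDICT (by name: the statement is the Claim_ definition above) =====
theorem get_unique_3pt_channels_spec : Claim_equal_get_unique_3pt_channels := by
  intro n _
  unfold Spec_get_unique_3pt_channels
  by_cases h : n = 6
  · subst h; decide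
  · exact main_ne n h
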